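-- pv_equiv track=rewrite | github.com/stellapetrova/optimization | main.py | count_word_frequencies_optimized
-- ===== SOURCE A (Python) =====
-- from collections import Counter
--
-- def count_word_frequencies_optimized(text, words_to_count):
--     if text is None:
--         return {}
--
--     cleaned_text = ''.join(char.lower() if char.isalnum() or char.isspace() else ' ' for char in text)
--     words_in_text = cleaned_text.split()
--     text_word_counts = Counter(words_in_text)
--
--     frequencies = {}
--     for word in words_to_count:
--         lower_word = word.lower()
--         frequencies[word] = text_word_counts.get(lower_word, 0)
--
--     return frequencies
-- ===== SOURCE B (Python) =====
-- def count_word_frequencies_optimized(text, words_to_count):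
--     if text is None:
--         return {}
--
--     counts = {}
--     for w in words_to_count:
--         counts[w.lower()] = 0
--
--     cur = []
--     for ch in text:
--         if ch.isalnum():
--             cur.append(ch.lower())
--         else:
--             if cur:
--                 token = ''.join(cur)
--                 if token in counts:
--                     counts[token] += 1
--                 cur = []
--     if cur:
--         token = ''.join(cur)
--         if token in counts:
--             counts[token] += 1
--
--     return {w: counts[w.lower()] for w in words_to_count}
-- ===== Notes on version B (the rewrite author's own statement) =====
-- stated objective: alternative
-- what changed: Replaces the clean-whole-string / str.split / Counter-everything pipeline by a single character scan that assembles lowercased alphanumeric tokens on the fly and increments counts only for target words, never materialising the cleaned text, the word list or counts of non-target words.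
import Mathlib
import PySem

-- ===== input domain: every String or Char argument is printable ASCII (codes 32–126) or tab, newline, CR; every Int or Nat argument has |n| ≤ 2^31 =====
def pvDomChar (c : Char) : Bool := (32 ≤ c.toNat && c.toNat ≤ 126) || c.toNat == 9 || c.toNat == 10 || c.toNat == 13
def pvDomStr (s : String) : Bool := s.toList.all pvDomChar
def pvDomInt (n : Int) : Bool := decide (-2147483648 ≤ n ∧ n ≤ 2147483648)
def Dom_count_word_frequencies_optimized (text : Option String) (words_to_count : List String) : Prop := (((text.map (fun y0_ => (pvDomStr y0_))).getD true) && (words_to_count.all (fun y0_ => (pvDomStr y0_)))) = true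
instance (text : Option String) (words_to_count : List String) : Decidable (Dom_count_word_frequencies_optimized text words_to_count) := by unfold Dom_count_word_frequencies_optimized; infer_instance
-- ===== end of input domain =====

-- B replaces the clean-whole-string / split / Counter-everything pipeline by a single character
-- scan that assembles lowercased alphanumeric tokens on the fly and counts only target words
-- (objective: alternative decomposition; no asymptotic change).

-- ===== PORT A =====
-- char.lower() if char.isalnum() or char.isspace() else ' '
def pvCleanChar (c : Char) : Char :=
  if PySem.Chars.isalnum c || PySem.Chars.isspace c then PySem.Chars.lowerChar c else ' '

def count_word_frequencies_optimized (text : Option String) (words_to_count : List String) : List (String × Int) :=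
  match text with
  | none => []
  | some t =>
    let cleaned_text : List Char := t.toList.map pvCleanChar
    let words_in_text : List (List Char) := PySem.Chars.split₀ cleaned_text
    let text_word_counts : PySem.Dict (List Char) Int := PySem.Dict.counter words_in_text
    let frequencies : PySem.Dict String Int :=
      words_to_count.foldl
        (fun d word => d.insert word (text_word_counts.getD (PySem.Chars.lower word.toList) 0))
        PySem.Dict.empty
    frequencies.items

-- ===== PORT B =====
-- 'if token in counts: counts[token] += 1'
def pvFlush (d : PySem.Dict (List Char) Int) (tok : List Char) : PySem.Dict (List Char) Int :=
  if d.contains tok then d.insert tok (d.getD tok 0 + 1) else d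

-- one step of B's character scan; state = (counts so far, current token's chars)
def pvStep (p : PySem.Dict (List Char) Int × List Char) (c : Char) :
    PySem.Dict (List Char) Int × List Char :=
  if PySem.Chars.isalnum c then (p.1, p.2 ++ [PySem.Chars.lowerChar c])
  else if p.2.isEmpty then p else (pvFlush p.1 p.2, [])

def count_word_frequencies_optimized_alt (text : Option String) (words_to_count : List String) : List (String × Int) :=
  match text with
  | none => []
  | some t =>
    let counts0 : PySem.Dict (List Char) Int :=
      words_to_count.foldl (fun d w => d.insert (PySem.Chars.lower w.toList) 0) PySem.Dict.empty
    let st := t.toList.foldl pvStep (counts0, [])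
    let counts := if st.2.isEmpty then st.1 else pvFlush st.1 st.2
    -- counts[w.lower()] : the key is always present (initialised above), so getD is exact
    (words_to_count.foldl
      (fun d w => d.insert w (counts.getD (PySem.Chars.lower w.toList) 0))
      PySem.Dict.empty).items

-- ===== PRECONDITION & SPEC =====
def Spec_count_word_frequencies_optimized (text : Option String) (words_to_count : List String) (out : List (String × Int)) : Prop := out = count_word_frequencies_optimized_alt text words_to_count
instance (text : Option String) (words_to_count : List String) (out : List (String × Int)) : Decidable (Spec_count_word_frequencies_optimized text words_to_count out) := by unfold Spec_count_word_frequencies_optimized; infer_instance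

-- ===== CLAIM (what is proved, stated in full; the proofs are below) =====
def Claim_equal_count_word_frequencies_optimized : Prop := ∀ (text : Option String) (words_to_count : List String), Dom_count_word_frequencies_optimized text words_to_count → Spec_count_word_frequencies_optimized text words_to_count (count_word_frequencies_optimized text words_to_count)

-- ===== LEMMAS AND PROOFS =====

theorem go_acc (m : List Char) : ∀ cur acc,
    PySem.Chars.split₀.go m cur acc = acc.reverse ++ PySem.Chars.split₀.go m cur [] := by
  induction m with
  | nil => intro cur acc; simp [PySem.Chars.split₀.go]; split <;> simp
  | cons c rest ih =>
    intro cur acc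
    simp only [PySem.Chars.split₀.go]
    split
    · split
      · exact ih _ _
      · rw [ih [] (cur.reverse :: acc), ih [] [cur.reverse]]; simp
    · exact ih _ _

theorem pvLeIff (a b : Char) : a ≤ b ↔ a.toNat ≤ b.toNat := by
  rw [Char.le_def]
  simp only [Char.toNat]
  exact ⟨fun h => by exact_mod_cast h, fun h => by exact_mod_cast h⟩

theorem pvLowerChar_of_not_upper (c : Char) (h : ¬ (65 ≤ c.toNat ∧ c.toNat ≤ 90)) :
    PySem.Chars.lowerChar c = c := by
  unfold PySem.Chars.lowerChar PySem.Chars.isupper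
  rw [if_neg]
  simp only [Bool.and_eq_true, decide_eq_true_eq, pvLeIff]
  show ¬ ((Char.toNat 'A' ≤ c.toNat) ∧ (c.toNat ≤ Char.toNat 'Z'))
  simpa using h

theorem pvIsspaceIff (c : Char) : PySem.Chars.isspace c = true ↔
    (c.toNat = 32 ∨ (9 ≤ c.toNat ∧ c.toNat ≤ 13) ∨ (28 ≤ c.toNat ∧ c.toNat ≤ 31) ∨ c.toNat = 133 ∨ c.toNat = 160 ∨ c.toNat = 5760 ∨ (8192 ≤ c.toNat ∧ c.toNat ≤ 8202) ∨ c.toNat = 8232 ∨ c.toNat = 8233 ∨ c.toNat = 8239 ∨ c.toNat = 8287 ∨ c.toNat = 12288) := by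
  unfold PySem.Chars.isspace
  simp only [Bool.or_eq_true, Bool.and_eq_true, decide_eq_true_eq]
  tauto

theorem pvIsalnumIff (c : Char) : PySem.Chars.isalnum c = true ↔
    ((65 ≤ c.toNat ∧ c.toNat ≤ 90) ∨ (97 ≤ c.toNat ∧ c.toNat ≤ 122) ∨ (48 ≤ c.toNat ∧ c.toNat ≤ 57)) := by
  unfold PySem.Chars.isalnum PySem.Chars.isalpha PySem.Chars.isdigit PySem.Chars.isupper PySem.Chars.islower
  simp only [Bool.or_eq_true, Bool.and_eq_true, decide_eq_true_eq, pvLeIff]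
  show (((Char.toNat 'A' ≤ c.toNat ∧ c.toNat ≤ Char.toNat 'Z') ∨ (Char.toNat 'a' ≤ c.toNat ∧ c.toNat ≤ Char.toNat 'z')) ∨ (Char.toNat '0' ≤ c.toNat ∧ c.toNat ≤ Char.toNat '9')) ↔ _
  tauto

theorem pvIsupperIff (c : Char) : PySem.Chars.isupper c = true ↔ (65 ≤ c.toNat ∧ c.toNat ≤ 90) := by
  unfold PySem.Chars.isupper
  simp only [Bool.and_eq_true, decide_eq_true_eq, pvLeIff]
  show (Char.toNat 'A' ≤ c.toNat ∧ c.toNat ≤ Char.toNat 'Z') ↔ _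
  tauto

-- cleaning a character yields a whitespace character iff the original was not alphanumeric
theorem isspace_clean (c : Char) :
    PySem.Chars.isspace (pvCleanChar c) = !PySem.Chars.isalnum c := by
  by_cases ha : PySem.Chars.isalnum c = true
  · rw [ha]
    unfold pvCleanChar
    rw [if_pos (by simp [ha])]
    simp only [Bool.not_true]
    rw [← Bool.not_eq_true, pvIsspaceIff]
    by_cases hu : PySem.Chars.isupper c = true
    · have hb := (pvIsupperIff c).mp hu
      unfold PySem.Chars.lowerChar
      rw [if_pos hu]
      have hv : (c.toNat + 32).isValidChar := Or.inl (by omega)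
      rw [Char.toNat_ofNat, if_pos hv]
      omega
    · have hb := (pvIsalnumIff c).mp ha
      have hb2 : ¬ (65 ≤ c.toNat ∧ c.toNat ≤ 90) := fun h => hu ((pvIsupperIff c).mpr h)
      rw [pvLowerChar_of_not_upper c hb2]
      omega
  · simp only [Bool.not_eq_true] at ha
    rw [ha, Bool.not_false]
    unfold pvCleanChar
    by_cases hs : PySem.Chars.isspace c = true
    · rw [if_pos (by simp [hs])]
      have hna : ¬ (65 ≤ c.toNat ∧ c.toNat ≤ 90) := by
        intro h
        exact absurd ((pvIsalnumIff c).mpr (Or.inl h)) (by simp [ha])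
      rw [pvLowerChar_of_not_upper c hna]
      exact hs
    · rw [if_neg (by simp only [Bool.or_eq_true, not_or, Bool.not_eq_true]; exact ⟨ha, by simpa using hs⟩)]
      decide

theorem clean_of_alnum (c : Char) (h : PySem.Chars.isalnum c = true) :
    pvCleanChar c = PySem.Chars.lowerChar c := by
  simp [pvCleanChar, h]

-- B's scan-and-flush equals folding pvFlush over the tokens Python's split() extracts
-- from the cleaned characters.
theorem scan_eq_flush_go (chars : List Char) : ∀ (d : PySem.Dict (List Char) Int) cur,
    (let st := chars.foldl pvStep (d, cur)
     if st.2.isEmpty then st.1 else pvFlush st.1 st.2)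
      = (PySem.Chars.split₀.go (chars.map pvCleanChar) cur.reverse []).foldl pvFlush d := by
  induction chars with
  | nil =>
    intro d cur
    simp only [List.foldl_nil, List.map_nil, PySem.Chars.split₀.go]
    by_cases h : cur.isEmpty = true
    · simp_all
    · simp_all
  | cons c rest ih =>
    intro d cur
    simp only [List.foldl_cons, List.map_cons, PySem.Chars.split₀.go]
    by_cases ha : PySem.Chars.isalnum c = true
    · rw [show PySem.Chars.isspace (pvCleanChar c) = false by simp [isspace_clean, ha]]
      simp only [Bool.false_eq_true, if_false]
      rw [show pvStep (d, cur) c = (d, cur ++ [PySem.Chars.lowerChar c]) by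
            simp [pvStep, ha]]
      rw [ih d (cur ++ [PySem.Chars.lowerChar c])]
      simp [clean_of_alnum c ha]
    · rw [show PySem.Chars.isspace (pvCleanChar c) = true by
            simp [isspace_clean, ha]]
      simp only [if_true]
      by_cases he : cur.isEmpty
      · rw [show pvStep (d, cur) c = (d, cur) by simp [pvStep, ha, he]]
        have hc : cur = [] := by simpa [List.isEmpty_iff] using he
        subst hc
        simp only [List.reverse_nil, List.isEmpty_nil, if_true]
        exact ih d []
      · rw [show pvStep (d, cur) c = (pvFlush d cur, []) by simp [pvStep, ha, he]]
        have hne : cur.reverse.isEmpty = false := by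
          simp only [List.isEmpty_reverse]; simpa using he
        rw [hne]
        simp only [Bool.false_eq_true, if_false]
        rw [go_acc _ [] [cur.reverse.reverse]]
        simp only [List.reverse_cons, List.reverse_nil, List.nil_append, List.reverse_reverse,
          List.foldl_append, List.foldl_cons, List.foldl_nil]
        rw [ih (pvFlush d cur) []]
        simp

theorem contains_pvFlush (d : PySem.Dict (List Char) Int) (tok k : List Char) :
    (pvFlush d tok).contains k = d.contains k := by
  unfold pvFlush
  split
  · rename_i h
    rw [PySem.Dict.contains_insert]
    by_cases hk : k = tok
    · subst hk; simp [h]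
    · simp [hk]
  · rfl

theorem getD_foldl_pvFlush (toks : List (List Char)) :
    ∀ (d : PySem.Dict (List Char) Int) t, d.contains t = true →
    (toks.foldl pvFlush d).getD t 0 = d.getD t 0 + toks.count t := by
  induction toks with
  | nil => intro d t _; simp
  | cons x rest ih =>
    intro d t h
    rw [List.foldl_cons, ih _ t (by rw [contains_pvFlush]; exact h)]
    by_cases hx : x = t
    · subst hx
      rw [show (pvFlush d x).getD x 0 = d.getD x 0 + 1 by
            simp [pvFlush, h]]
      rw [List.count_cons_self]
      push_cast; ring
    · rw [show (pvFlush d x).getD t 0 = d.getD t 0 by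
            unfold pvFlush
            split
            · rw [PySem.Dict.getD_insert]
              simp [show ¬ t = x from fun hh => hx hh.symm]
            · rfl]
      rw [List.count_cons]
      simp [hx]

-- the initial dictionary of B has value 0 at every key
theorem getD_init_zero (ws : List String) :
    ∀ (d : PySem.Dict (List Char) Int) t, d.getD t 0 = 0 →
    (ws.foldl (fun d w => d.insert (PySem.Chars.lower w.toList) 0) d).getD t 0 = 0 := by
  induction ws with
  | nil => intro d t h; exact h
  | cons w rest ih =>
    intro d t h
    rw [List.foldl_cons]
    refine ih _ t ?_
    rw [PySem.Dict.getD_insert]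
    split <;> simp [h]

theorem contains_foldl_insert_of_contains (ws : List String) :
    ∀ (d : PySem.Dict (List Char) Int) t, d.contains t = true →
    (ws.foldl (fun d w => d.insert (PySem.Chars.lower w.toList) 0) d).contains t = true := by
  induction ws with
  | nil => intro d t h; exact h
  | cons w rest ih =>
    intro d t h
    rw [List.foldl_cons]
    refine ih _ t ?_
    rw [PySem.Dict.contains_insert]
    simp [h]

theorem contains_init (ws : List String) (w : String) (hw : w ∈ ws) :
    ∀ (d : PySem.Dict (List Char) Int),
    (ws.foldl (fun d w => d.insert (PySem.Chars.lower w.toList) 0) d).contains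
      (PySem.Chars.lower w.toList) = true := by
  induction ws with
  | nil => cases hw
  | cons x rest ih =>
    intro d
    rw [List.foldl_cons]
    rcases List.mem_cons.mp hw with h | h
    · subst h
      exact contains_foldl_insert_of_contains rest _ _ (by
        rw [PySem.Dict.contains_insert]; simp)
    · exact ih h _

-- ===== VERDICT (by name: the statement is the Claim_ definition above) =====
theorem count_word_frequencies_optimized_spec : Claim_equal_count_word_frequencies_optimized := by
  intro text words_to_count _
  unfold Spec_count_word_frequencies_optimized
  cases text with
  | none => rfl
  | some t =>
    unfold count_word_frequencies_optimized count_word_frequencies_optimized_alt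
    simp only
    congr 1
    set counts0 : PySem.Dict (List Char) Int :=
      words_to_count.foldl (fun d w => d.insert (PySem.Chars.lower w.toList) 0) PySem.Dict.empty
      with hc0
    have hscan := scan_eq_flush_go t.toList counts0 []
    simp only [List.reverse_nil] at hscan
    refine PySem.List.foldl_congr_mem _ _ _ _ ?_
    intro d w hw
    congr 1
    rw [hscan]
    have hcont : counts0.contains (PySem.Chars.lower w.toList) = true :=
      contains_init words_to_count w hw PySem.Dict.empty
    rw [getD_foldl_pvFlush _ _ _ hcont]
    rw [show counts0.getD (PySem.Chars.lower w.toList) 0 = 0 from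
          getD_init_zero words_to_count PySem.Dict.empty _ (by simp)]
    rw [PySem.Dict.getD_counter]
    simp [PySem.Chars.split₀]
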